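-- pv_equiv track=rewrite | github.com/SuryaTalla22/Certified-Golden-Maximality-for-Invariant-Circle-Thresholds-in-Conservative-Twist-Maps | code_repository/kam_theorem_suite/adaptive_incompatibility.py | _longest_suffix_subset
-- ===== SOURCE A (Python) =====
-- from typing import Any, Sequence
--
-- def _longest_suffix_subset(generated_qs: Sequence[int], witness_qs: set[int]) -> list[int]:
--     ordered = sorted({int(q) for q in generated_qs})
--     if not ordered:
--         return []
--     for idx in range(len(ordered)):
--         tail = ordered[idx:]
--         if tail and all(q in witness_qs for q in tail):
--             return tail
--     return []
-- ===== SOURCE B (Python) =====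
-- def _longest_suffix_subset(generated_qs, witness_qs):
--     # One pass over the sorted distinct values: keep a running suffix,
--     # resetting it whenever a value is not in the witness set.
--     out = []
--     for q in sorted({int(q) for q in generated_qs}):
--         if q in witness_qs:
--             out.append(q)
--         else:
--             out = []
--     return out
-- ===== Notes on version B (the rewrite author's own statement) =====
-- stated objective: faster
-- what changed: Replaces the quadratic scan that re-checks every tail with a single pass over the sorted distinct values that resets an accumulator at each non-witness element.
import Mathlib
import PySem

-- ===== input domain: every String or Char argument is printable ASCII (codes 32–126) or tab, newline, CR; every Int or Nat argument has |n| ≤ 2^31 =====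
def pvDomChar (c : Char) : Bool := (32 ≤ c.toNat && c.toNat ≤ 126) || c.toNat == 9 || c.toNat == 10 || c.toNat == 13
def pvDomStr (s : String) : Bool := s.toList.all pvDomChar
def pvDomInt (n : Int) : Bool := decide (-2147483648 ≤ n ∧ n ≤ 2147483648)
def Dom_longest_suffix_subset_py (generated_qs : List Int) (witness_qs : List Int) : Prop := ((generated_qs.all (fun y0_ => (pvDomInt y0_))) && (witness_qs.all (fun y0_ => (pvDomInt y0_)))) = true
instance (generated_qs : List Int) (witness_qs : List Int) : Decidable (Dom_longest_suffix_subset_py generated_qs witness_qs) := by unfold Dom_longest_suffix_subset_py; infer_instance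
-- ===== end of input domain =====

-- B replaces A's quadratic "try each tail" scan with a single pass over the
-- sorted distinct values that resets an accumulator at each non-witness value (faster, asymptotic).

-- ===== PORT A =====
-- the for-loop over range(len(ordered)): try each tail in turn
def pvAScan (ordered : List Int) (witness_qs : List Int) : List Nat → List Int
  | [] => []
  | idx :: rest =>
    let tail := ordered.drop idx
    if !tail.isEmpty && tail.all (fun q => PySem.Set.contains witness_qs q) then tail
    else pvAScan ordered witness_qs rest

def longest_suffix_subset_py (generated_qs : List Int) (witness_qs : List Int) : List Int :=
  let ordered := PySem.List.sorted (PySem.Set.ofList generated_qs) (fun x => x) false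
  if ordered = [] then []
  else pvAScan ordered witness_qs (List.range ordered.length)

-- ===== PORT B =====
def longest_suffix_subset_py_alt (generated_qs : List Int) (witness_qs : List Int) : List Int :=
  (PySem.List.sorted (PySem.Set.ofList generated_qs) (fun x => x) false).foldl
    (fun out q => if PySem.Set.contains witness_qs q then out ++ [q] else []) []

-- ===== PRECONDITION & SPEC =====
def Spec_longest_suffix_subset_py (generated_qs : List Int) (witness_qs : List Int) (out : List Int) : Prop := out = longest_suffix_subset_py_alt generated_qs witness_qs
instance (generated_qs : List Int) (witness_qs : List Int) (out : List Int) : Decidable (Spec_longest_suffix_subset_py generated_qs witness_qs out) := by unfold Spec_longest_suffix_subset_py; infer_instance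

-- ===== CLAIM (what is proved, stated in full; the proofs are below) =====
def Claim_equal_longest_suffix_subset_py : Prop := ∀ (generated_qs : List Int) (witness_qs : List Int), Dom_longest_suffix_subset_py generated_qs witness_qs → Spec_longest_suffix_subset_py generated_qs witness_qs (longest_suffix_subset_py generated_qs witness_qs)

-- ===== LEMMAS AND PROOFS =====

-- structural version of A's loop: try the whole list, else recurse on the tail
def pvAStruct (witness_qs : List Int) : List Int → List Int
  | [] => []
  | x :: xs =>
    if (x :: xs).all (fun q => PySem.Set.contains witness_qs q) then x :: xs
    else pvAStruct witness_qs xs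

-- B's fold with an arbitrary accumulator
theorem pvFold_acc (w : List Int) (l : List Int) : ∀ acc : List Int,
    l.foldl (fun out q => if PySem.Set.contains w q then out ++ [q] else []) acc
    = (if l.all (fun q => PySem.Set.contains w q) then acc else [])
      ++ l.foldl (fun out q => if PySem.Set.contains w q then out ++ [q] else []) [] := by
  induction l with
  | nil => intro acc; simp
  | cons x xs ih =>
    intro acc
    simp only [List.foldl_cons]
    rw [ih (if PySem.Set.contains w x then acc ++ [x] else []),
        ih (if PySem.Set.contains w x then [] ++ [x] else [])]
    by_cases hx : x ∈ w <;>
      by_cases hxs : ∀ y ∈ xs, y ∈ w <;>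
      simp [hx, hxs]
    simp only [if_pos hxs]
    simp

theorem pvFold_all (w : List Int) (l : List Int)
    (h : l.all (fun q => PySem.Set.contains w q)) :
    l.foldl (fun out q => if PySem.Set.contains w q then out ++ [q] else []) [] = l := by
  induction l with
  | nil => rfl
  | cons x xs ih =>
    simp only [List.all_cons, Bool.and_eq_true] at h
    rw [List.foldl_cons, if_pos h.1, List.nil_append, pvFold_acc, ih h.2, if_pos h.2]
    simp

-- the index loop shifted by one is the loop on the tail
theorem pvAScan_shift (x : Int) (xs w : List Int) (idxs : List Nat) :
    pvAScan (x :: xs) w (idxs.map (· + 1)) = pvAScan xs w idxs := by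
  induction idxs with
  | nil => rfl
  | cons i rest ih =>
    simp only [List.map_cons, pvAScan, List.drop_succ_cons]
    split_ifs <;> simp_all

theorem pvAScan_range (w : List Int) (l : List Int) :
    pvAScan l w (List.range l.length) = pvAStruct w l := by
  induction l with
  | nil => rfl
  | cons x xs ih =>
    rw [List.length_cons, List.range_succ_eq_map]
    show pvAScan (x :: xs) w (0 :: (List.range xs.length).map (· + 1)) = _
    rw [pvAScan, pvAScan_shift, ih]
    simp only [List.drop_zero, pvAStruct]
    by_cases h : ∀ y ∈ x :: xs, y ∈ w <;> simp [h]

theorem pvAStruct_eq_fold (w : List Int) (l : List Int) :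
    pvAStruct w l
    = l.foldl (fun out q => if PySem.Set.contains w q then out ++ [q] else []) [] := by
  induction l with
  | nil => rfl
  | cons x xs ih =>
    rw [pvAStruct, List.foldl_cons, pvFold_acc, ih]
    by_cases hxs : ∀ y ∈ xs, y ∈ w
    · rw [pvFold_all w xs (by simpa using hxs)]
      by_cases hx : x ∈ w <;> simp [hx, if_pos hxs]
    · by_cases hx : x ∈ w <;> simp [hx, hxs]

-- ===== VERDICT (by name: the statement is the Claim_ definition above) =====
theorem longest_suffix_subset_py_spec : Claim_equal_longest_suffix_subset_py := by
  intro g w _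
  unfold Spec_longest_suffix_subset_py longest_suffix_subset_py longest_suffix_subset_py_alt
  set ordered := PySem.List.sorted (PySem.Set.ofList g) (fun x => x) false with hord
  by_cases h : ordered = []
  · simp [h]
  · rw [if_neg h, pvAScan_range, pvAStruct_eq_fold]
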